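-- pv_equiv track=rewrite | github.com/hayssamchebli-chh/Phoenix-Catalogues-Automation | app.py | pick_default_excel_column
-- ===== SOURCE A (Python) =====
-- from typing import Dict, Iterable, List, Optional, Sequence, Tuple
--
-- def pick_default_excel_column(columns: List[str]) -> int:
--     preferred = [
--         "Item No.1",
--         "Item No.",
--         "Item No",
--         "Order No.",
--         "Order No",
--         "Material",
--         "Material Number",
--         "Product Number",
--         "Part Number",
--         "Code",
--     ]
--
--     lookup = {str(col).strip().lower(): idx for idx, col in enumerate(columns)}
--
--     for name in preferred:
--         if name.lower() in lookup:
--             return lookup[name.lower()]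
--
--     return 0
-- ===== SOURCE B (Python) =====
-- def pick_default_excel_column(columns):
--     preferred = [
--         "Item No.1",
--         "Item No.",
--         "Item No",
--         "Order No.",
--         "Order No",
--         "Material",
--         "Material Number",
--         "Product Number",
--         "Part Number",
--         "Code",
--     ]
--     rank = {name.lower(): i for i, name in enumerate(preferred)}
--     best_rank = len(preferred)  # sentinel larger than any rank
--     best_idx = 0
--     for i, col in enumerate(columns):
--         r = rank.get(str(col).strip().lower())
--         if r is not None and r <= best_rank:
--             # '<=' so a later duplicate of the best name wins (dict last-write-wins)
--             best_rank = r
--             best_idx = i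
--     return best_idx
-- ===== Notes on version B (the rewrite author's own statement) =====
-- stated objective: alternative
-- what changed: Replaces the column->index dict plus a scan over the preferred list with a rank table over the preferred names and a single accumulator scan over the columns keeping the best (lowest-rank, latest) column index.
import Mathlib
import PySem

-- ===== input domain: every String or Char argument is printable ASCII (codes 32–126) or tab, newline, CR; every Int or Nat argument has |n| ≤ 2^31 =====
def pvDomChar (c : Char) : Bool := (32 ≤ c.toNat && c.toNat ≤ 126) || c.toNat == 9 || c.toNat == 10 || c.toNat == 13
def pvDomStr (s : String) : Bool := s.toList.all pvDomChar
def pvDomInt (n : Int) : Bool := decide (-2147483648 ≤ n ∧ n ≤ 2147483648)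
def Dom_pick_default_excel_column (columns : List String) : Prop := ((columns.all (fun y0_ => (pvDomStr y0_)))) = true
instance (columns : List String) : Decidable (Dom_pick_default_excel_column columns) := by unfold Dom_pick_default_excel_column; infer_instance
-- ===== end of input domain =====

-- B replaces A's column->index dict + scan over the preferred list by a rank table over the
-- preferred names and one accumulator scan over the columns (alternative decomposition, same cost).

-- ===== PORT A =====
def pvPreferred : List String :=
  ["Item No.1", "Item No.", "Item No", "Order No.", "Order No",
   "Material", "Material Number", "Product Number", "Part Number", "Code"]

-- str(col).strip().lower()
def pvNorm (s : String) : String := PySem.Str.lower (PySem.Str.strip s)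

-- the dict comprehension {str(col).strip().lower(): idx for idx, col in enumerate(columns)}
def pvLookup (columns : List String) : PySem.Dict String Int :=
  (PySem.List.enumerate columns).foldl
    (fun d p => d.insert (pvNorm p.2) p.1) PySem.Dict.empty

-- the 'for name in preferred: if name.lower() in lookup: return lookup[name.lower()]' loop
def pvALoop (lookup : PySem.Dict String Int) : List String → Int
  | [] => 0
  | name :: rest =>
    match lookup.get? (PySem.Str.lower name) with
    | some v => v
    | none => pvALoop lookup rest

def pick_default_excel_column (columns : List String) : Int :=
  pvALoop (pvLookup columns) pvPreferred

-- ===== PORT B =====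
-- rank = {name.lower(): i for i, name in enumerate(preferred)}
def pvRankDict : PySem.Dict String Int :=
  (PySem.List.enumerate pvPreferred).foldl
    (fun d p => d.insert (PySem.Str.lower p.2) p.1) PySem.Dict.empty

-- the body of 'for i, col in enumerate(columns)': state (best_rank, best_idx)
def pvBStep (s : Int × Int) (p : Int × String) : Int × Int :=
  match pvRankDict.get? (pvNorm p.2) with
  | some r => if r ≤ s.1 then (r, p.1) else s
  | none => s

def pick_default_excel_column_alt (columns : List String) : Int :=
  ((PySem.List.enumerate columns).foldl pvBStep (10, 0)).2

-- ===== PRECONDITION & SPEC =====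
def Spec_pick_default_excel_column (columns : List String) (out : Int) : Prop := out = pick_default_excel_column_alt columns
instance (columns : List String) (out : Int) : Decidable (Spec_pick_default_excel_column columns out) := by unfold Spec_pick_default_excel_column; infer_instance

-- ===== CLAIM (what is proved, stated in full; the proofs are below) =====
def Claim_equal_pick_default_excel_column : Prop := ∀ (columns : List String), Dom_pick_default_excel_column columns → Spec_pick_default_excel_column columns (pick_default_excel_column columns)

-- ===== LEMMAS AND PROOFS =====

-- rank (position counted from base b) of the first name in prefs whose lowercase equals key
def pvPrefRankOf (key : String) : List String → Int → Option Int
  | [], _ => none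
  | p :: rest, b =>
    if PySem.Str.lower p == key then some b else pvPrefRankOf key rest (b + 1)

-- rank of the first name of prefs present in lookup (b + length if none)
def pvRank (lookup : PySem.Dict String Int) : List String → Int → Int
  | [], b => b
  | name :: rest, b =>
    match lookup.get? (PySem.Str.lower name) with
    | some _ => b
    | none => pvRank lookup rest (b + 1)

theorem pvRankDict_get? (key : String) :
    pvRankDict.get? key = pvPrefRankOf key pvPreferred 0 := by
  rw [show pvRankDict = PySem.Dict.mk
      [("item no.1", 0), ("item no.", 1), ("item no", 2), ("order no.", 3), ("order no", 4),
       ("material", 5), ("material number", 6), ("product number", 7), ("part number", 8),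
       ("code", 9)] from by decide]
  simp only [pvPreferred, pvPrefRankOf, PySem.Dict.get?_mk_cons,
    show PySem.Str.lower "Item No.1" = "item no.1" from by decide,
    show PySem.Str.lower "Item No." = "item no." from by decide,
    show PySem.Str.lower "Item No" = "item no" from by decide,
    show PySem.Str.lower "Order No." = "order no." from by decide,
    show PySem.Str.lower "Order No" = "order no" from by decide,
    show PySem.Str.lower "Material" = "material" from by decide,
    show PySem.Str.lower "Material Number" = "material number" from by decide,
    show PySem.Str.lower "Product Number" = "product number" from by decide,
    show PySem.Str.lower "Part Number" = "part number" from by decide,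
    show PySem.Str.lower "Code" = "code" from by decide]
  norm_num [PySem.Dict.get?]

theorem pvRank_ge (lookup : PySem.Dict String Int) (prefs : List String) (b : Int) :
    b ≤ pvRank lookup prefs b := by
  induction prefs generalizing b with
  | nil => simp [pvRank]
  | cons p rest ih =>
    cases h : lookup.get? (PySem.Str.lower p) with
    | some v => simp [pvRank, h]
    | none =>
      simp only [pvRank, h]
      have := ih (b + 1); omega

theorem pvPrefRankOf_ge (key : String) (prefs : List String) (b r : Int)
    (h : pvPrefRankOf key prefs b = some r) : b ≤ r := by
  induction prefs generalizing b with
  | nil => simp [pvPrefRankOf] at h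
  | cons p rest ih =>
    simp only [pvPrefRankOf] at h
    by_cases hc : (PySem.Str.lower p == key) = true
    · rw [if_pos hc] at h; injection h with h; omega
    · rw [if_neg hc] at h; have := ih (b + 1) h; omega

theorem pvStep (prefs : List String) (d : PySem.Dict String Int) (k : String) (n b : Int) :
    pvRank (d.insert k n) prefs b =
      (match pvPrefRankOf k prefs b with
       | some r => if r ≤ pvRank d prefs b then r else pvRank d prefs b
       | none => pvRank d prefs b) ∧
    pvALoop (d.insert k n) prefs =
      (match pvPrefRankOf k prefs b with
       | some r => if r ≤ pvRank d prefs b then n else pvALoop d prefs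
       | none => pvALoop d prefs) := by
  induction prefs generalizing b with
  | nil => simp [pvRank, pvALoop, pvPrefRankOf]
  | cons p rest ih =>
    by_cases hk : PySem.Str.lower p = k
    · -- the head name is the inserted key
      subst hk
      have hge := pvRank_ge d (p :: rest) b
      set R := pvRank d (p :: rest) b with hR
      simp only [pvRank, pvALoop, pvPrefRankOf, beq_self_eq_true, if_true,
        PySem.Dict.get?_insert_self]
      exact ⟨by rw [if_pos hge], by rw [if_pos hge]⟩
    · have hget : (d.insert k n).get? (PySem.Str.lower p) = d.get? (PySem.Str.lower p) :=
        PySem.Dict.get?_insert_of_ne d n hk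
      have hbeq : (PySem.Str.lower p == k) = false := by simp [hk]
      cases hcase : d.get? (PySem.Str.lower p) with
      | some v =>
        -- head already present in d: any rank found in the tail is > b, so nothing changes
        simp only [pvRank, pvALoop, pvPrefRankOf, hget, hcase, hbeq, Bool.false_eq_true,
          if_false]
        cases hro : pvPrefRankOf k rest (b + 1) with
        | none => exact ⟨rfl, rfl⟩
        | some r =>
          have hr := pvPrefRankOf_ge k rest (b + 1) r hro
          refine ⟨?_, ?_⟩
          · show b = if r ≤ b then r else b
            rw [if_neg (by omega)]
          · show v = if r ≤ b then n else v
            rw [if_neg (by omega)]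
      | none =>
        simp only [pvRank, pvALoop, pvPrefRankOf, hget, hcase, hbeq, Bool.false_eq_true,
          if_false]
        exact ih (b + 1)

-- B's fold state = (rank of first preferred name present in A's dict, A's loop result)
theorem pvInvariant (columns : List String) :
    ((PySem.List.enumerate columns).foldl pvBStep (10, 0)) =
      (pvRank (pvLookup columns) pvPreferred 0, pvALoop (pvLookup columns) pvPreferred) := by
  induction columns using List.reverseRecOn with
  | nil => decide
  | append_singleton cs c ih =>
    have henum : PySem.List.enumerate (cs ++ [c]) =
        PySem.List.enumerate cs ++ [((cs.length : Int), c)] := by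
      rw [PySem.List.enumerate_append]
      simp [PySem.List.enumerate_cons, PySem.List.enumerate_nil]
    have hdict : pvLookup (cs ++ [c]) = (pvLookup cs).insert (pvNorm c) (cs.length : Int) := by
      simp [pvLookup, henum, List.foldl_append]
    rw [henum, List.foldl_append, List.foldl, List.foldl, ih, hdict]
    have hstep := pvStep pvPreferred (pvLookup cs) (pvNorm c) (cs.length : Int) 0
    simp only [pvBStep, pvRankDict_get?]
    cases hro : pvPrefRankOf (pvNorm c) pvPreferred 0 with
    | none =>
      simp only [hro] at hstep
      rw [hstep.1, hstep.2]
    | some r =>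
      simp only [hro] at hstep
      by_cases hle : r ≤ pvRank (pvLookup cs) pvPreferred 0
      · simp only [if_pos hle] at hstep ⊢
        rw [hstep.1, hstep.2]
      · simp only [if_neg hle] at hstep ⊢
        rw [hstep.1, hstep.2]

-- ===== VERDICT (by name: the statement is the Claim_ definition above) =====
theorem pick_default_excel_column_spec : Claim_equal_pick_default_excel_column := by
  intro columns _
  unfold Spec_pick_default_excel_column pick_default_excel_column pick_default_excel_column_alt
  rw [pvInvariant]
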